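-- pv_equiv track=rewrite | github.com/TomiIsojarvi/MOOC-Ohjelmoinnin-perusteet-2023-Python | Osa 4/osa04-19_listan_pisimmat/src/listan_pisimmat.py | pisimmat
-- ===== SOURCE A (Python) =====
-- def pisimmat(lista):
-- 	suurin_pituus = 0
-- 	suurimmat = []
--
-- 	for i in lista:
-- 		pituus = len(i)
-- 		if pituus >= suurin_pituus:
-- 			suurin_pituus = pituus
--
-- 	for j in lista:
-- 		pituus = len(j)
-- 		if pituus == suurin_pituus:
-- 			suurimmat.append(j)
--
-- 	return suurimmat
-- ===== SOURCE B (Python) =====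
-- def pisimmat(lista):
--     suurin_pituus = 0
--     suurimmat = []
--     for x in lista:
--         pituus = len(x)
--         if pituus > suurin_pituus:
--             suurin_pituus = pituus
--             suurimmat = [x]
--         elif pituus == suurin_pituus:
--             suurimmat.append(x)
--     return suurimmat
-- ===== Notes on version B (the rewrite author's own statement) =====
-- stated objective: alternative
-- what changed: Replaced A's two passes (find the max length, then filter for it) with a single pass that tracks the running max and resets or extends the collected list as it goes.
import Mathlib
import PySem

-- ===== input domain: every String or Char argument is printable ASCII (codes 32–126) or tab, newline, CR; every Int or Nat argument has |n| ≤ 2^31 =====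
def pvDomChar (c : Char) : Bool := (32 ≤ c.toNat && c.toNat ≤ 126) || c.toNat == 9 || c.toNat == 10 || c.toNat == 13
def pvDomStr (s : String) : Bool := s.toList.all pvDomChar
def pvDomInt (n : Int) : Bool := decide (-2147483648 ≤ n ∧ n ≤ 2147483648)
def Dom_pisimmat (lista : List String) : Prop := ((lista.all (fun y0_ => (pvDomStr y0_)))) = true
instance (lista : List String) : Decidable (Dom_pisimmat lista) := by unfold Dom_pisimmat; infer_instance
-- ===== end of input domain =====

-- B replaces A's two passes (find max length, then filter) with a single pass that
-- tracks the running max and resets/extends the collected list (objective: alternative decomposition).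

-- ===== PORT A =====
def pisimmat (lista : List String) : List String :=
  let suurin_pituus : Int :=
    lista.foldl (fun m i =>
      let pituus := PySem.Str.len i
      if pituus ≥ m then pituus else m) 0
  lista.foldl (fun acc j =>
    let pituus := PySem.Str.len j
    if pituus = suurin_pituus then acc ++ [j] else acc) []

-- ===== PORT B =====
def pisimmat_alt (lista : List String) : List String :=
  (lista.foldl (fun (st : Int × List String) x =>
    let pituus := PySem.Str.len x
    if pituus > st.1 then (pituus, [x])
    else if pituus = st.1 then (st.1, st.2 ++ [x])
    else st) ((0 : Int), ([] : List String))).2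

-- ===== PRECONDITION & SPEC =====
def Spec_pisimmat (lista : List String) (out : List String) : Prop := out = pisimmat_alt lista
instance (lista : List String) (out : List String) : Decidable (Spec_pisimmat lista out) := by unfold Spec_pisimmat; infer_instance

-- ===== CLAIM (what is proved, stated in full; the proofs are below) =====
def Claim_equal_pisimmat : Prop := ∀ (lista : List String), Dom_pisimmat lista → Spec_pisimmat lista (pisimmat lista)

-- ===== LEMMAS AND PROOFS =====

def aMax (l : List String) (m : Int) : Int :=
  l.foldl (fun m i =>
    let pituus := PySem.Str.len i
    if pituus ≥ m then pituus else m) m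

def bStep (st : Int × List String) (x : String) : Int × List String :=
  let pituus := PySem.Str.len x
  if pituus > st.1 then (pituus, [x])
  else if pituus = st.1 then (st.1, st.2 ++ [x])
  else st

theorem le_aMax : ∀ (l : List String) (m : Int), m ≤ aMax l m := by
  intro l
  induction l with
  | nil => intro m; simp [aMax]
  | cons x l ih =>
    intro m
    show m ≤ aMax l (if PySem.Str.len x ≥ m then PySem.Str.len x else m)
    refine le_trans ?_ (ih _)
    split_ifs with h <;> omega

theorem bFold_eq : ∀ (l : List String) (m : Int) (acc : List String),
    l.foldl bStep (m, acc) =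
      (aMax l m,
        (if aMax l m = m then acc else []) ++
          l.filter (fun j => decide (PySem.Str.len j = aMax l m))) := by
  intro l
  induction l with
  | nil => intro m acc; simp [aMax]
  | cons x l ih =>
    intro m acc
    have hstepA : aMax (x :: l) m = aMax l (if PySem.Str.len x ≥ m then PySem.Str.len x else m) := rfl
    have hstepB : (x :: l).foldl bStep (m, acc) = l.foldl bStep (bStep (m, acc) x) := rfl
    rw [hstepB, hstepA]
    simp only [PySem.Str.len_eq] at *
    by_cases h1 : ((x.toList.length : Int)) > m
    · rw [if_pos (le_of_lt h1)]
      have hb : bStep (m, acc) x = ((x.toList.length : Int), [x]) := by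
        simp only [bStep, PySem.Str.len_eq]
        rw [if_pos h1]
      rw [hb, ih]
      have hle := le_aMax l (x.toList.length : Int)
      by_cases h2 : aMax l (x.toList.length : Int) = (x.toList.length : Int)
      · rw [h2]
        have hne : ((x.toList.length : Int)) ≠ m := by omega
        simp_all [List.filter_cons]
      · have hgt : aMax l (x.toList.length : Int) ≠ m := by omega
        have hne : ((x.toList.length : Int)) ≠ aMax l (x.toList.length : Int) := fun h => h2 h.symm
        simp_all [List.filter_cons]
    · have hb : bStep (m, acc) x =
          if ((x.toList.length : Int)) = m then (m, acc ++ [x]) else (m, acc) := by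
        simp only [bStep, PySem.Str.len_eq]
        rw [if_neg h1]
      by_cases h2 : ((x.toList.length : Int)) = m
      · rw [if_pos (le_of_eq h2.symm), h2]
        rw [hb, if_pos h2, ih]
        have hle := le_aMax l m
        by_cases h3 : aMax l m = m
        · simp_all [List.filter_cons]
        · have hne : ((x.toList.length : Int)) ≠ aMax l m := by omega
          simp_all [List.filter_cons]
      · have hlt : ((x.toList.length : Int)) < m := by omega
        rw [if_neg (by omega : ¬ ((x.toList.length : Int)) ≥ m)]
        rw [hb, if_neg h2, ih]
        have hle := le_aMax l m
        have hne : ((x.toList.length : Int)) ≠ aMax l m := by omega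
        simp_all [List.filter_cons]

theorem pisimmat_eq_filter (lista : List String) :
    pisimmat lista = lista.filter (fun j => decide (PySem.Str.len j = aMax lista 0)) := by
  show lista.foldl (fun acc j =>
      let pituus := PySem.Str.len j
      if pituus = aMax lista 0 then acc ++ [j] else acc) [] = _
  rw [PySem.List.foldl_append_ite_eq_filter]
  simp

-- ===== VERDICT (by name: the statement is the Claim_ definition above) =====
theorem pisimmat_spec : Claim_equal_pisimmat := by
  intro lista _
  show pisimmat lista = pisimmat_alt lista
  have halt : pisimmat_alt lista = (lista.foldl bStep (0, [])).2 := rfl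
  rw [halt, bFold_eq, pisimmat_eq_filter]
  split_ifs <;> simp
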